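-- pv_equiv track=rewrite | github.com/charan0033/ToDolist | prc.py | prio_order
-- ===== SOURCE A (Python) =====
-- def prio_order(tasks,last_date,priority):
--     ord = []
--     for i in range (len(tasks)):
--         if(priority[i]=='High'):
--             ord.append(i+1)
--     for i in range(len(tasks)):
--         if(priority[i]=='Medium'):
--             ord.append(i+1)
--     for i in range(len(tasks)):
--         if(priority[i]=='Low'):
--             ord.append(i+1)
--     return ord
-- ===== SOURCE B (Python) =====
-- def prio_order(tasks, last_date, priority):
--     high, medium, low = [], [], []
--     for i in range(len(tasks)):
--         p = priority[i]
--         if p == 'High':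
--             high.append(i + 1)
--         elif p == 'Medium':
--             medium.append(i + 1)
--         elif p == 'Low':
--             low.append(i + 1)
--     return high + medium + low
-- ===== Notes on version B (the rewrite author's own statement) =====
-- stated objective: alternative
-- what changed: One pass that buckets each index into high/medium/low lists and concatenates, replacing A's three sequential filtering scans over the indices.
import Mathlib
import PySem

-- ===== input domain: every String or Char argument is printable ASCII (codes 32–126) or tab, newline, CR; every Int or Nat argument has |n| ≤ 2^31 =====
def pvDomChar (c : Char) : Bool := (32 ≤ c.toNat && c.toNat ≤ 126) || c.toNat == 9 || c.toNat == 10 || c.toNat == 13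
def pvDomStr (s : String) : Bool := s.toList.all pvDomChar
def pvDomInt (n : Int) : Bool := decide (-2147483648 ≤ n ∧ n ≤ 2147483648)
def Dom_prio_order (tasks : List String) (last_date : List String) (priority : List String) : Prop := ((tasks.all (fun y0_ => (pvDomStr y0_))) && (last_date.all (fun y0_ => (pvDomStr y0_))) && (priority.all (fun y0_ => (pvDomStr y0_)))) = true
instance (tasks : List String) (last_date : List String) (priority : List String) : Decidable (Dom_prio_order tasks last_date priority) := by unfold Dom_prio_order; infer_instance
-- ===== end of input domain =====

-- B buckets indices into high/medium/low lists in one pass and concatenates, replacing A's three filtering scans.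


-- ===== PORT A =====
def prio_order (tasks : List String) (last_date : List String) (priority : List String) : List Int :=
  let o1 := (PySem.List.pyRange 0 (tasks.length : Int) 1).foldl
    (fun acc i => if PySem.List.pyGetD priority i "" = "High" then acc ++ [i + 1] else acc) []
  let o2 := (PySem.List.pyRange 0 (tasks.length : Int) 1).foldl
    (fun acc i => if PySem.List.pyGetD priority i "" = "Medium" then acc ++ [i + 1] else acc) o1
  let o3 := (PySem.List.pyRange 0 (tasks.length : Int) 1).foldl
    (fun acc i => if PySem.List.pyGetD priority i "" = "Low" then acc ++ [i + 1] else acc) o2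
  o3

-- ===== PORT B =====
def prio_order_alt (tasks : List String) (last_date : List String) (priority : List String) : List Int :=
  let st := (PySem.List.pyRange 0 (tasks.length : Int) 1).foldl
    (fun (s : List Int × List Int × List Int) i =>
      let p := PySem.List.pyGetD priority i ""
      if p = "High" then (s.1 ++ [i + 1], s.2.1, s.2.2)
      else if p = "Medium" then (s.1, s.2.1 ++ [i + 1], s.2.2)
      else if p = "Low" then (s.1, s.2.1, s.2.2 ++ [i + 1])
      else s)
    ([], [], [])
  st.1 ++ st.2.1 ++ st.2.2

-- ===== PRECONDITION & SPEC =====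
-- Pre_: Python A indexes priority[i] for every i < len(tasks), so it raises IndexError
-- (as does B) when priority is shorter than tasks; exactly those inputs are excluded.
def Pre_prio_order (tasks : List String) (last_date : List String) (priority : List String) : Prop :=
  tasks.length ≤ priority.length
instance (tasks : List String) (last_date : List String) (priority : List String) : Decidable (Pre_prio_order tasks last_date priority) := by unfold Pre_prio_order; infer_instance
def pvWitness_prio_order : List String × List String × List String :=
  (["a", "b", "c"], ["d1", "d2", "d3"], ["Low", "High", "Medium"])

def Spec_prio_order (tasks : List String) (last_date : List String) (priority : List String) (out : List Int) : Prop := out = prio_order_alt tasks last_date priority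
instance (tasks : List String) (last_date : List String) (priority : List String) (out : List Int) : Decidable (Spec_prio_order tasks last_date priority out) := by unfold Spec_prio_order; infer_instance

-- ===== CLAIM (what is proved, stated in full; the proofs are below) =====
def Claim_equal_prio_order : Prop := ∀ (tasks : List String) (last_date : List String) (priority : List String), Dom_prio_order tasks last_date priority → Pre_prio_order tasks last_date priority → Spec_prio_order tasks last_date priority (prio_order tasks last_date priority)

-- ===== LEMMAS AND PROOFS =====

-- B's fold, with accumulators generalized: each bucket collects its matching indices.
theorem altFold_eq (priority : List String) (L : List Int)
    (h m lo : List Int) :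
    L.foldl
      (fun (s : List Int × List Int × List Int) i =>
        let p := PySem.List.pyGetD priority i ""
        if p = "High" then (s.1 ++ [i + 1], s.2.1, s.2.2)
        else if p = "Medium" then (s.1, s.2.1 ++ [i + 1], s.2.2)
        else if p = "Low" then (s.1, s.2.1, s.2.2 ++ [i + 1])
        else s)
      (h, m, lo)
    = (h ++ (L.filter (fun i => PySem.List.pyGetD priority i "" == "High")).map (· + 1),
       m ++ (L.filter (fun i => PySem.List.pyGetD priority i "" == "Medium")).map (· + 1),
       lo ++ (L.filter (fun i => PySem.List.pyGetD priority i "" == "Low")).map (· + 1)) := by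
  induction L generalizing h m lo with
  | nil => simp
  | cons x xs ih =>
    simp only [List.foldl_cons]
    by_cases hH : PySem.List.pyGetD priority x "" = "High"
    · simp [hH, ih]
    · by_cases hM : PySem.List.pyGetD priority x "" = "Medium"
      · simp [hM, ih]
      · by_cases hL : PySem.List.pyGetD priority x "" = "Low"
        · simp [hL, ih]
        · simp [hH, hM, hL, ih]

-- A's append-if fold is a filter-then-map.
theorem aFold_eq (priority : List String) (pat : String) (L : List Int) (acc : List Int) :
    L.foldl (fun acc i => if PySem.List.pyGetD priority i "" = pat then acc ++ [i + 1] else acc) acc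
    = acc ++ (L.filter (fun i => PySem.List.pyGetD priority i "" == pat)).map (· + 1) := by
  induction L generalizing acc with
  | nil => simp
  | cons x xs ih =>
    simp only [List.foldl_cons, List.filter_cons]
    by_cases h : PySem.List.pyGetD priority x "" = pat <;> simp [h, ih]

-- ===== VERDICT (by name: the statement is the Claim_ definition above) =====
theorem prio_order_spec : Claim_equal_prio_order := by
  intro tasks last_date priority _ _
  unfold Spec_prio_order prio_order prio_order_alt
  rw [altFold_eq]
  simp only [aFold_eq, List.nil_append, List.append_assoc]
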